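-- pv_equiv track=rewrite | github.com/dennis-wei/AdventCode2019 | 6/solution.py | get_num_orbits
-- ===== SOURCE A (Python) =====
-- def get_num_orbits(o, orbits, memoized_orbits):
--     if not o in orbits:
--         return 0
--     elif o in memoized_orbits:
--         return memoized_orbits[o]
--
--     res = get_num_orbits(orbits[o], orbits, memoized_orbits) + 1
--     memoized_orbits[o] = res
--     return res
-- ===== SOURCE B (Python) =====
-- def get_num_orbits(o, orbits, memoized_orbits):
--     if o not in orbits:
--         return 0
--     path = []
--     current = o
--     while current in orbits and current not in memoized_orbits:
--         path.append(current)
--         current = orbits[current]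
--     base = memoized_orbits[current] if current in orbits else 0
--     for node in reversed(path):
--         base += 1
--         memoized_orbits[node] = base
--     return base
-- ===== Notes on version B (the rewrite author's own statement) =====
-- stated objective: alternative
-- what changed: Replaces the memoized recursion with an iterative walk that collects the chain of un-memoized ancestors into an explicit path list and then fills the memo back-to-front from the terminal node's base value.
import Mathlib
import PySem

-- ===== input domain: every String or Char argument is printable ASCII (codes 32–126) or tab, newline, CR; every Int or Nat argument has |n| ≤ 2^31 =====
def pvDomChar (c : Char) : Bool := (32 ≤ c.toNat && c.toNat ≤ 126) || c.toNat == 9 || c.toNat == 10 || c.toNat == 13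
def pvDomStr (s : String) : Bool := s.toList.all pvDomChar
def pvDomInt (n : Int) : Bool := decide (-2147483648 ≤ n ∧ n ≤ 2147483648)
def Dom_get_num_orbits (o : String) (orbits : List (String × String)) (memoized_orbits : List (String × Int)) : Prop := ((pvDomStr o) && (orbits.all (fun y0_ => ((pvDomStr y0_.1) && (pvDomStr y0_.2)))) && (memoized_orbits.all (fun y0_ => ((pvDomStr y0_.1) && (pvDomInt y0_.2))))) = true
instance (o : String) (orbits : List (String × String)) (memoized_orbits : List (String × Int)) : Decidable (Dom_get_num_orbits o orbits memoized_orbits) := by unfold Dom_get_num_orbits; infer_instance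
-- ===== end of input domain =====

-- B replaces A's memoized recursion by an iterative walk up the parent chain with an explicit
-- path list filled back-to-front (alternative decomposition, same cost). Both Pythons mutate
-- memoized_orbits identically; the equivalence proved here is about the RETURN value only, so
-- the ports omit that in-place write (within one call all reads happen before any write, so it
-- cannot affect the return value).

-- ===== PORT A =====
-- A's recursion, with fuel orbits.length + 1 only to make it total in Lean; under
-- Pre_get_num_orbits the fuel is never exhausted (lemma goA_eq below uses exactly that).
def goA (fuel : Nat) (o : String) (orbits : List (String × String)) (memoized_orbits : List (String × Int)) : Int :=
  match fuel with
  | 0 => 0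
  | fuel + 1 =>
    match orbits.lookup o with
    | none => 0                                   -- if not o in orbits: return 0
    | some nxt =>
      match memoized_orbits.lookup o with
      | some v => v                               -- elif o in memoized_orbits: return memoized_orbits[o]
      | none => goA fuel nxt orbits memoized_orbits + 1   -- res = get_num_orbits(orbits[o], …) + 1

def get_num_orbits (o : String) (orbits : List (String × String)) (memoized_orbits : List (String × Int)) : Int :=
  goA (orbits.length + 1) o orbits memoized_orbits

-- ===== PORT B =====
-- the while loop of B: collect the path of un-memoized orbiting nodes, return (path, terminal);
-- same fuel bound, never exhausted under Pre_get_num_orbits.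
def walkB (fuel : Nat) (current : String) (orbits : List (String × String)) (memoized_orbits : List (String × Int)) : List String × String :=
  match fuel with
  | 0 => ([], current)
  | fuel + 1 =>
    match orbits.lookup current with
    | none => ([], current)
    | some nxt =>
      match memoized_orbits.lookup current with
      | some _ => ([], current)
      | none =>
        let (p, t) := walkB fuel nxt orbits memoized_orbits
        (current :: p, t)

def get_num_orbits_alt (o : String) (orbits : List (String × String)) (memoized_orbits : List (String × Int)) : Int :=
  match orbits.lookup o with
  | none => 0
  | some _ =>
    let (path, current) := walkB (orbits.length + 1) o orbits memoized_orbits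
    let base : Int :=
      if (orbits.lookup current).isSome then ((memoized_orbits.lookup current).getD 0) else 0
    path.reverse.foldl (fun b _ => b + 1) base    -- for node in reversed(path): base += 1

-- ===== PRECONDITION & SPEC =====
-- one step of the parent walk: move to orbits[x] while x is an un-memoized key of orbits
def pvStep (orbits : List (String × String)) (memoized_orbits : List (String × Int)) (x : String) : String :=
  match orbits.lookup x with
  | none => x
  | some nxt => if (memoized_orbits.lookup x).isNone then nxt else x

def pvActive (orbits : List (String × String)) (memoized_orbits : List (String × Int)) (x : String) : Bool :=
  (orbits.lookup x).isSome && (memoized_orbits.lookup x).isNone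

-- Pre_ excludes exactly the inputs on which A does not return: when the chain of un-memoized
-- parents starting at o cycles, A's recursion raises RecursionError (and B's loop diverges).
-- On a terminating chain its nodes are distinct keys of orbits, so orbits.length steps reach
-- (and then stay at) an inactive node; hence Pre_ holds on every input where A returns.
def Pre_get_num_orbits (o : String) (orbits : List (String × String)) (memoized_orbits : List (String × Int)) : Prop :=
  pvActive orbits memoized_orbits ((pvStep orbits memoized_orbits)^[orbits.length] o) = false
instance (o : String) (orbits : List (String × String)) (memoized_orbits : List (String × Int)) : Decidable (Pre_get_num_orbits o orbits memoized_orbits) := by unfold Pre_get_num_orbits; infer_instance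

def pvWitness_get_num_orbits : String × (List (String × String)) × (List (String × Int)) :=
  ("B", [("B", "COM")], [])

def Spec_get_num_orbits (o : String) (orbits : List (String × String)) (memoized_orbits : List (String × Int)) (out : Int) : Prop := out = get_num_orbits_alt o orbits memoized_orbits
instance (o : String) (orbits : List (String × String)) (memoized_orbits : List (String × Int)) (out : Int) : Decidable (Spec_get_num_orbits o orbits memoized_orbits out) := by unfold Spec_get_num_orbits; infer_instance

-- ===== CLAIM (what is proved, stated in full; the proofs are below) =====
def Claim_equal_get_num_orbits : Prop := ∀ (o : String) (orbits : List (String × String)) (memoized_orbits : List (String × Int)), Dom_get_num_orbits o orbits memoized_orbits → Pre_get_num_orbits o orbits memoized_orbits → Spec_get_num_orbits o orbits memoized_orbits (get_num_orbits o orbits memoized_orbits)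

-- ===== LEMMAS AND PROOFS =====

-- counting loop: folding "+1" over a list adds its length
lemma foldl_add_one_length (l : List String) (b : Int) :
    l.foldl (fun b _ => b + 1) b = b + l.length := by
  induction l generalizing b with
  | nil => simp
  | cons x xs ih => simp [List.foldl, ih]; ring

-- core invariant: if the walk from o is inactive after n steps and the fuel exceeds n,
-- A's recursion returns B's base value plus the length of B's collected path.
lemma goA_eq_walkB (orbits : List (String × String)) (memo : List (String × Int)) :
    ∀ (n f : Nat) (o : String), n < f →
    pvActive orbits memo ((pvStep orbits memo)^[n] o) = false →
    goA f o orbits memo =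
      (if (orbits.lookup (walkB f o orbits memo).2).isSome
        then ((memo.lookup (walkB f o orbits memo).2).getD 0) else 0)
      + ((walkB f o orbits memo).1.length : Int) := by
  intro n
  induction n with
  | zero =>
    intro f o hf h
    obtain ⟨f', rfl⟩ : ∃ f', f = f' + 1 := ⟨f - 1, by omega⟩
    simp only [Function.iterate_zero, id_eq] at h
    unfold pvActive at h
    cases ho : orbits.lookup o with
    | none => simp [goA, walkB, ho]
    | some nxt =>
      cases hm : memo.lookup o with
      | none => simp [ho, hm] at h
      | some v => simp [goA, walkB, ho, hm]
  | succ n ih =>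
    intro f o hf h
    obtain ⟨f', rfl⟩ : ∃ f', f = f' + 1 := ⟨f - 1, by omega⟩
    cases ho : orbits.lookup o with
    | none => simp [goA, walkB, ho]
    | some nxt =>
      cases hm : memo.lookup o with
      | some v => simp [goA, walkB, ho, hm]
      | none =>
        have hstep : pvStep orbits memo o = nxt := by simp [pvStep, ho, hm]
        have h' : pvActive orbits memo ((pvStep orbits memo)^[n] nxt) = false := by
          rwa [Function.iterate_succ_apply, hstep] at h
        have := ih f' nxt (by omega) h'
        simp only [goA, walkB, ho, hm]
        cases hw : walkB f' nxt orbits memo with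
        | mk p t =>
          rw [hw] at this
          simp only at this ⊢
          rw [this]
          simp only [List.length_cons]
          push_cast
          ring

theorem get_num_orbits_spec : Claim_equal_get_num_orbits := by
  intro o orbits memo _ hpre
  unfold Spec_get_num_orbits get_num_orbits get_num_orbits_alt
  cases ho : orbits.lookup o with
  | none => simp [goA, ho]
  | some nxt =>
    have := goA_eq_walkB orbits memo orbits.length (orbits.length + 1) o (by omega) hpre
    cases hw : walkB (orbits.length + 1) o orbits memo with
    | mk p t =>
      rw [hw] at this
      simp only [foldl_add_one_length, List.length_reverse]
      simpa using this
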